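-- pv_equiv track=rewrite | github.com/jplfaria/ModelSEEDagent | src/reasoning/enhanced_prompt_provider.py | _generate_synthesis_questions
-- ===== SOURCE A (Python) =====
-- from typing import Any, Dict, List, Optional, Tuple
--
-- def _generate_synthesis_questions(
--     enhanced_results: List[Dict[str, Any]]
-- ) -> List[str]:
--     """Generate questions for cross-tool synthesis"""
--     questions = [
--         "How do the results from different tools support or contradict each other?",
--         "What unified biological story emerges from these analyses?",
--         "What systems-level insights can be drawn from the integrated results?",
--         "What testable hypotheses arise from combining these findings?",
--         "How do the different analyses validate or extend each other?",
--     ]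
--
--     # Add context-specific synthesis questions
--     tool_types = set()
--     for result in enhanced_results:
--         tool_name = result.get("tool_name", "unknown")
--         if "fba" in tool_name.lower():
--             tool_types.add("growth_analysis")
--         elif "flux" in tool_name.lower():
--             tool_types.add("flux_analysis")
--         elif "media" in tool_name.lower():
--             tool_types.add("media_analysis")
--
--     if "growth_analysis" in tool_types and "flux_analysis" in tool_types:
--         questions.append(
--             "How do flux patterns explain the observed growth performance?"
--         )
--
--     if "media_analysis" in tool_types and "growth_analysis" in tool_types:
--         questions.append("How does media composition relate to growth limitations?")
--
--     return questions
-- ===== SOURCE B (Python) =====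
-- from typing import Any, Dict, List, Optional, Tuple
--
-- def _generate_synthesis_questions(
--     enhanced_results: List[Dict[str, Any]]
-- ) -> List[str]:
--     """Generate questions for cross-tool synthesis (set-free reformulation)."""
--     names = [r.get("tool_name", "unknown").lower() for r in enhanced_results]
--     has_growth = any("fba" in n for n in names)
--     has_flux = any("flux" in n and "fba" not in n for n in names)
--     has_media = any("media" in n and "flux" not in n and "fba" not in n for n in names)
--     return [
--         "How do the results from different tools support or contradict each other?",
--         "What unified biological story emerges from these analyses?",
--         "What systems-level insights can be drawn from the integrated results?",
--         "What testable hypotheses arise from combining these findings?",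
--         "How do the different analyses validate or extend each other?",
--     ] + (
--         ["How do flux patterns explain the observed growth performance?"]
--         if has_growth and has_flux
--         else []
--     ) + (
--         ["How does media composition relate to growth limitations?"]
--         if has_media and has_growth
--         else []
--     )
-- ===== Notes on version B (the rewrite author's own statement) =====
-- stated objective: idiomatic
-- what changed: Replaces the mutable set-accumulating loop with three independent any() scans over lowercased tool names (the elif precedence is folded into the predicates) and builds the result as one list expression instead of conditional appends.
import Mathlib
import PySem

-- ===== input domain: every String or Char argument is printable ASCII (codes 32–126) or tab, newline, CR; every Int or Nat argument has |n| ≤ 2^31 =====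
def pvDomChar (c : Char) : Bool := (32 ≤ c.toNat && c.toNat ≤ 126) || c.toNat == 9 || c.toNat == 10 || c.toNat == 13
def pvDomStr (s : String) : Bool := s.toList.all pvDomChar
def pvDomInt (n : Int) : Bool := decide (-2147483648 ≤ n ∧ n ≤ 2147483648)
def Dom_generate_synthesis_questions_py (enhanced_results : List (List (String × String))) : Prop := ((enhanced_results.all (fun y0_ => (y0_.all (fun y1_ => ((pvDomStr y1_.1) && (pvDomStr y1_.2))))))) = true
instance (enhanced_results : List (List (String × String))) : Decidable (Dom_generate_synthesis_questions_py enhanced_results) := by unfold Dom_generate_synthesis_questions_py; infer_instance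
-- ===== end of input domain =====

-- B replaces A's set-accumulating loop by three independent any-scans and one list expression (idiomatic; same O(n) cost).

-- ===== PORT A =====
def pvBaseQuestions : List String :=
  ["How do the results from different tools support or contradict each other?",
   "What unified biological story emerges from these analyses?",
   "What systems-level insights can be drawn from the integrated results?",
   "What testable hypotheses arise from combining these findings?",
   "How do the different analyses validate or extend each other?"]

-- loop body of A's 'for result in enhanced_results'
def pvStepA (s : PySem.Set String) (result : List (String × String)) : PySem.Set String :=
  let tool_name := PySem.Dict.getD (PySem.Dict.mk result) "tool_name" "unknown"
  if PySem.Str.isIn "fba" (PySem.Str.lower tool_name) then PySem.Set.add s "growth_analysis"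
  else if PySem.Str.isIn "flux" (PySem.Str.lower tool_name) then PySem.Set.add s "flux_analysis"
  else if PySem.Str.isIn "media" (PySem.Str.lower tool_name) then PySem.Set.add s "media_analysis"
  else s

def generate_synthesis_questions_py (enhanced_results : List (List (String × String))) : List String :=
  let questions := pvBaseQuestions
  let tool_types : PySem.Set String := enhanced_results.foldl pvStepA PySem.Set.empty
  let questions :=
    if PySem.Set.contains tool_types "growth_analysis" && PySem.Set.contains tool_types "flux_analysis" then
      questions ++ ["How do flux patterns explain the observed growth performance?"]
    else questions
  let questions :=
    if PySem.Set.contains tool_types "media_analysis" && PySem.Set.contains tool_types "growth_analysis" then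
      questions ++ ["How does media composition relate to growth limitations?"]
    else questions
  questions

-- ===== PORT B =====
def generate_synthesis_questions_py_alt (enhanced_results : List (List (String × String))) : List String :=
  let names := enhanced_results.map (fun r => PySem.Str.lower (PySem.Dict.getD (PySem.Dict.mk r) "tool_name" "unknown"))
  let has_growth := names.any (fun n => PySem.Str.isIn "fba" n)
  let has_flux := names.any (fun n => PySem.Str.isIn "flux" n && !PySem.Str.isIn "fba" n)
  let has_media := names.any (fun n => PySem.Str.isIn "media" n && !PySem.Str.isIn "flux" n && !PySem.Str.isIn "fba" n)
  pvBaseQuestions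
    ++ (if has_growth && has_flux then ["How do flux patterns explain the observed growth performance?"] else [])
    ++ (if has_media && has_growth then ["How does media composition relate to growth limitations?"] else [])

-- ===== PRECONDITION & SPEC =====
def Spec_generate_synthesis_questions_py (enhanced_results : List (List (String × String))) (out : List String) : Prop := out = generate_synthesis_questions_py_alt enhanced_results
instance (enhanced_results : List (List (String × String))) (out : List String) : Decidable (Spec_generate_synthesis_questions_py enhanced_results out) := by unfold Spec_generate_synthesis_questions_py; infer_instance

-- ===== CLAIM (what is proved, stated in full; the proofs are below) =====
def Claim_equal_generate_synthesis_questions_py : Prop := ∀ (enhanced_results : List (List (String × String))), Dom_generate_synthesis_questions_py enhanced_results → Spec_generate_synthesis_questions_py enhanced_results (generate_synthesis_questions_py enhanced_results)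

-- ===== LEMMAS AND PROOFS =====

-- membership after Python set.add
theorem pv_contains_add (s : PySem.Set String) (x y : String) :
    PySem.Set.contains (PySem.Set.add s x) y = (PySem.Set.contains s y || decide (y = x)) := by
  unfold PySem.Set.add
  split_ifs with h
  · by_cases hxy : y = x
    · subst hxy; simp_all [PySem.Set.contains]
    · simp [hxy]
  · simp [PySem.Set.contains, List.mem_append]

theorem pv_contains_empty (y : String) :
    PySem.Set.contains (PySem.Set.empty : PySem.Set String) y = false := by
  simp [PySem.Set.contains, PySem.Set.empty]

-- A's loop body, with the three branch tests abstracted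
def pvStep {α : Type} (p q m : α → Bool) (s : PySem.Set String) (r : α) : PySem.Set String :=
  if p r then PySem.Set.add s "growth_analysis"
  else if q r then PySem.Set.add s "flux_analysis"
  else if m r then PySem.Set.add s "media_analysis"
  else s

theorem pv_stepA_eq : pvStepA = pvStep
    (fun r => PySem.Str.isIn "fba" (PySem.Str.lower (PySem.Dict.getD (PySem.Dict.mk r) "tool_name" "unknown")))
    (fun r => PySem.Str.isIn "flux" (PySem.Str.lower (PySem.Dict.getD (PySem.Dict.mk r) "tool_name" "unknown")))
    (fun r => PySem.Str.isIn "media" (PySem.Str.lower (PySem.Dict.getD (PySem.Dict.mk r) "tool_name" "unknown"))) := rfl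

-- membership of each tag in the folded set
theorem pv_fold_growth {α : Type} (p q m : α → Bool) (l : List α) (s : PySem.Set String) :
    PySem.Set.contains (l.foldl (pvStep p q m) s) "growth_analysis"
      = (PySem.Set.contains s "growth_analysis" || l.any p) := by
  induction l generalizing s with
  | nil => simp
  | cons r t ih =>
    simp only [List.foldl_cons, List.any_cons, pvStep]
    split_ifs with h1 h2 h3 <;> simp only [ih, pv_contains_add] <;>
      simp_all [Bool.or_assoc, Bool.or_comm, Bool.or_left_comm]

theorem pv_fold_flux {α : Type} (p q m : α → Bool) (l : List α) (s : PySem.Set String) :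
    PySem.Set.contains (l.foldl (pvStep p q m) s) "flux_analysis"
      = (PySem.Set.contains s "flux_analysis" || l.any (fun r => q r && !p r)) := by
  induction l generalizing s with
  | nil => simp
  | cons r t ih =>
    simp only [List.foldl_cons, List.any_cons, pvStep]
    split_ifs with h1 h2 h3 <;> simp only [ih, pv_contains_add] <;>
      simp_all [Bool.or_assoc, Bool.or_comm, Bool.or_left_comm]

theorem pv_fold_media {α : Type} (p q m : α → Bool) (l : List α) (s : PySem.Set String) :
    PySem.Set.contains (l.foldl (pvStep p q m) s) "media_analysis"
      = (PySem.Set.contains s "media_analysis" || l.any (fun r => m r && !q r && !p r)) := by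
  induction l generalizing s with
  | nil => simp
  | cons r t ih =>
    simp only [List.foldl_cons, List.any_cons, pvStep]
    split_ifs with h1 h2 h3 <;> simp only [ih, pv_contains_add] <;>
      simp_all [Bool.or_assoc, Bool.or_comm, Bool.or_left_comm]

-- ===== VERDICT (by name: the statement is the Claim_ definition above) =====
theorem generate_synthesis_questions_py_spec : Claim_equal_generate_synthesis_questions_py := by
  intro er _
  unfold Spec_generate_synthesis_questions_py
  unfold generate_synthesis_questions_py generate_synthesis_questions_py_alt
  rw [pv_stepA_eq]
  simp only [pv_fold_growth, pv_fold_flux, pv_fold_media, pv_contains_empty, Bool.false_or,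
    List.any_map, Function.comp_def, Bool.and_assoc]
  split_ifs <;> simp_all
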